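-- pv_equiv track=rewrite | github.com/douzujun/Python-Foundation-Suda | 上机和面试/Python-Foundation-Suda-master/06_其他/PTA/1002_要通过.py | check_pat
-- ===== SOURCE A (Python) =====
-- def check_pat(pat_list):
--     result_list = []
--     for pat in pat_list:
--         status = 0
--         a1 = a2 = a3 = 0
--         for ch in pat:
--             if status == 0:
--                 if ch == 'A':
--                     a1 += 1
--                 elif ch == 'P':
--                     status = 1
--                 else:
--                     result_list.append('NO')
--                     break
--             elif status == 1:
--                 if ch == 'A':
--                     a2 += 1
--                 elif ch == 'T':
--                     status = 2
--                 else: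
--                     result_list.append('NO')
--                     break
--             elif status == 2:
--                 if ch == 'A':
--                     a3 += 1
--                 else:
--                     result_list.append('NO')
--                     break
--         else:
--             if a2 == 0 or status!=2:
--                 result_list.append('NO')
--             elif a1 * a2 == a3:
--                 result_list.append('YES')
--             else:
--                 result_list.append('NO')
--     return result_list
-- ===== SOURCE B (Python) =====
-- def check_pat(pat_list):
--     def judge(p):
--         head, sep1, rest = p.partition('P')
--         mid, sep2, tail = rest.partition('T')
--         if not (sep1 and sep2 and mid):
--             return 'NO'
--         if not all(c == 'A' for c in head + mid + tail):
--             return 'NO'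
--         return 'YES' if len(head) * len(mid) == len(tail) else 'NO'
--     return [judge(p) for p in pat_list]
-- ===== Notes on version B (the rewrite author's own statement) =====
-- stated objective: idiomatic
-- what changed: Replaces the char-by-char state machine (status/counters with early break) by a structural decomposition: partition the string at the first 'P' and then at the first 'T', validate that the three pieces are all-'A' segments, and check len(head)*len(mid)==len(tail).
import Mathlib
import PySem

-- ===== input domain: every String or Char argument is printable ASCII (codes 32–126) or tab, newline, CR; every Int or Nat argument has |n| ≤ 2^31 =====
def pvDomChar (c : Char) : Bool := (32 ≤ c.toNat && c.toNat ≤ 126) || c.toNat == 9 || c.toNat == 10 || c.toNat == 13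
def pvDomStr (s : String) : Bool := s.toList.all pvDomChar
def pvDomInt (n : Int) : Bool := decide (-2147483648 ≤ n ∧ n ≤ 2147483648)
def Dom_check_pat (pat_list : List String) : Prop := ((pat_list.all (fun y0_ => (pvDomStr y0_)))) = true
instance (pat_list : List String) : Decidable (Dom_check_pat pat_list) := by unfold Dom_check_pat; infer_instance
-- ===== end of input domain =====

-- B replaces A's char-by-char state machine by partition-at-'P'/'T' plus an all-'A' check (idiomatic; same cost).

-- ===== PORT A =====
-- aLoop is A's inner 'for ch in pat' loop: state = (status, a1, a2, a3); an early 'break'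
-- yields "NO", falling off the end runs the for-else checks.
def aLoop : List Char → Nat → Nat → Nat → Nat → String
  | [], status, _a1, a2, _a3 =>
      if a2 == 0 || status != 2 then "NO"
      else if _a1 * a2 == _a3 then "YES" else "NO"
  | ch :: rest, status, a1, a2, a3 =>
      if status == 0 then
        if ch == 'A' then aLoop rest 0 (a1+1) a2 a3
        else if ch == 'P' then aLoop rest 1 a1 a2 a3
        else "NO"
      else if status == 1 then
        if ch == 'A' then aLoop rest 1 a1 (a2+1) a3
        else if ch == 'T' then aLoop rest 2 a1 a2 a3
        else "NO"
      else if status == 2 then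
        if ch == 'A' then aLoop rest 2 a1 a2 (a3+1)
        else "NO"
      else aLoop rest status a1 a2 a3
def check_pat (pat_list : List String) : List String :=
  pat_list.map (fun pat => aLoop pat.toList 0 0 0 0)

-- ===== PORT B =====
-- pyPartition is an exact port of Python str.partition(sep) for a one-char separator:
-- (part before first sep, whether sep occurs, part after first sep); (s, False, '') when absent.
def pyPartition (s : List Char) (sep : Char) : List Char × Bool × List Char :=
  match s.dropWhile (· ≠ sep) with
  | [] => (s, false, [])
  | _ :: rest => (s.takeWhile (· ≠ sep), true, rest)

def bJudge (p : List Char) : String :=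
  let pr := pyPartition p 'P'
  let tr := pyPartition pr.2.2 'T'
  if !(pr.2.1 && tr.2.1 && !tr.1.isEmpty) then "NO"
  else if !((pr.1 ++ tr.1 ++ tr.2.2).all (· == 'A')) then "NO"
  else if pr.1.length * tr.1.length == tr.2.2.length then "YES" else "NO"

def check_pat_alt (pat_list : List String) : List String :=
  pat_list.map (fun p => bJudge p.toList)

-- ===== PRECONDITION & SPEC =====
def Spec_check_pat (pat_list : List String) (out : List String) : Prop := out = check_pat_alt pat_list
instance (pat_list : List String) (out : List String) : Decidable (Spec_check_pat pat_list out) := by unfold Spec_check_pat; infer_instance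

-- ===== CLAIM (what is proved, stated in full; the proofs are below) =====
def Claim_equal_check_pat : Prop := ∀ (pat_list : List String), Dom_check_pat pat_list → Spec_check_pat pat_list (check_pat pat_list)

-- ===== LEMMAS AND PROOFS =====
-- P0/P1/P2 characterize aLoop in status 0/1/2; judge_eq connects them to bJudge.
def P2 (tail : List Char) (a1 a2 a3 : Nat) : String :=
  if tail.all (· == 'A') then
    (if a2 = 0 then "NO" else if a1 * a2 = a3 + tail.length then "YES" else "NO")
  else "NO"
def P1 (rest : List Char) (a1 a2 : Nat) : String :=
  match rest.dropWhile (· == 'A') with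
  | [] => "NO"
  | c :: tail => if c = 'T' then P2 tail a1 (a2 + (rest.takeWhile (· == 'A')).length) 0 else "NO"
def P0 (cs : List Char) (a1 : Nat) : String :=
  match cs.dropWhile (· == 'A') with
  | [] => "NO"
  | c :: rest => if c = 'P' then P1 rest (a1 + (cs.takeWhile (· == 'A')).length) 0 else "NO"
theorem aLoop2_eq (tail : List Char) : ∀ a1 a2 a3, aLoop tail 2 a1 a2 a3 = P2 tail a1 a2 a3 := by
  induction tail with
  | nil => intro a1 a2 a3; simp [aLoop, P2]
  | cons c cs ih =>
      intro a1 a2 a3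
      by_cases hc : c = 'A'
      · subst hc
        simp [aLoop, ih, P2]
        simp [Nat.add_comm, Nat.add_left_comm]
        rfl
      · simp [aLoop, hc, P2]
theorem aLoop1_eq (rest : List Char) : ∀ a1 a2, aLoop rest 1 a1 a2 0 = P1 rest a1 a2 := by
  induction rest with
  | nil => intro a1 a2; simp [aLoop, P1]
  | cons c cs ih =>
      intro a1 a2
      by_cases hc : c = 'A'
      · subst hc
        simp [aLoop, ih, P1]
        cases h : cs.dropWhile (· == 'A') with
        | nil => rfl
        | cons d tl =>
            by_cases hd : d = 'T' <;> simp [hd]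
            have e : a2 + 1 + (cs.takeWhile (· == 'A')).length = a2 + ((cs.takeWhile (· == 'A')).length + 1) := by omega
            rw [e]
      · by_cases ht : c = 'T'
        · subst ht
          simp [aLoop, P1, aLoop2_eq]
        · simp [aLoop, hc, ht, P1]
theorem aLoop0_eq (cs : List Char) : ∀ a1, aLoop cs 0 a1 0 0 = P0 cs a1 := by
  induction cs with
  | nil => intro a1; simp [aLoop, P0]
  | cons c cs ih =>
      intro a1
      by_cases hc : c = 'A'
      · subst hc
        simp [aLoop, ih, P0]
        cases h : cs.dropWhile (· == 'A') with
        | nil => rfl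
        | cons d tl =>
            by_cases hd : d = 'P' <;> simp [hd]
            have e : a1 + 1 + (cs.takeWhile (· == 'A')).length = a1 + ((cs.takeWhile (· == 'A')).length + 1) := by omega
            rw [e]
      · by_cases hp : c = 'P'
        · subst hp
          simp [aLoop, P0, aLoop1_eq]
        · simp [aLoop, hc, hp, P0]

theorem takeWhile_append_all {l r : List Char} {q : Char → Bool} (h : ∀ x ∈ l, q x = true) :
    (l ++ r).takeWhile q = l ++ r.takeWhile q := by
  induction l with
  | nil => simp
  | cons c cs ih =>
      have hc := h c (by simp)
      simp [hc, ih (fun x hx => h x (by simp [hx]))]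

theorem dropWhile_append_all {l r : List Char} {q : Char → Bool} (h : ∀ x ∈ l, q x = true) :
    (l ++ r).dropWhile q = r.dropWhile q := by
  induction l with
  | nil => simp
  | cons c cs ih =>
      have hc := h c (by simp)
      simp [hc, ih (fun x hx => h x (by simp [hx]))]

theorem dropWhile_head_false {q : Char → Bool} : ∀ (l : List Char) {d : Char} {tl : List Char}, l.dropWhile q = d :: tl → q d = false
  | [], _, _, h => by simp [List.dropWhile] at h
  | c :: cs, d, tl, h => by
      by_cases hc : q c = true
      · rw [List.dropWhile_cons, if_pos hc] at h
        exact dropWhile_head_false cs h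
      · rw [List.dropWhile_cons, if_neg hc] at h
        cases h; simpa using hc

theorem bNo (head mid tail : List Char) (s2 : Bool)
    (hbad : (head ++ mid ++ tail).all (· == 'A') = false) :
    (if !(true && s2 && !mid.isEmpty) then "NO"
     else if !((head ++ mid ++ tail).all (· == 'A')) then "NO"
     else if head.length * mid.length == tail.length then "YES" else "NO") = "NO" := by
  cases hcond : (true && s2 && !mid.isEmpty)
  · rw [if_pos (show (!false) = true from rfl)]
  · have h2 := hbad
    simp [List.all_append] at h2
    rw [if_neg (by simp), if_pos ?_]
    simp [List.all_append]
    by_cases hA : ∀ x ∈ head, x = 'A'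
    · by_cases hB : ∀ x ∈ mid, x = 'A'
      · exact Or.inr (Or.inr (h2 hA hB))
      · push Not at hB; exact Or.inr (Or.inl hB)
    · push Not at hA; exact Or.inl hA

theorem inner_eq (rest head : List Char) (hh : head.all (· == 'A') = true) :
    (if !(true && (pyPartition rest 'T').2.1 && !(pyPartition rest 'T').1.isEmpty) then "NO"
     else if !((head ++ (pyPartition rest 'T').1 ++ (pyPartition rest 'T').2.2).all (· == 'A')) then "NO"
     else if head.length * (pyPartition rest 'T').1.length == (pyPartition rest 'T').2.2.length then "YES" else "NO")
    = P1 rest head.length 0 := by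
  have hsplit := List.takeWhile_append_dropWhile (p := (· == 'A')) (l := rest)
  have hallt : ∀ x ∈ rest.takeWhile (· == 'A'), (x == 'A') = true := by
    intro x hx; exact List.mem_takeWhile_imp (p := (· == 'A')) hx
  have halltT : ∀ x ∈ rest.takeWhile (· == 'A'), (decide (x ≠ 'T')) = true := by
    intro x hx; have := hallt x hx; simp at this; simp [this]
  cases hd : rest.dropWhile (· == 'A') with
  | nil =>
      have hrest : rest.takeWhile (· == 'A') = rest := by
        rw [hd] at hsplit; simpa using hsplit
      have hdT : rest.dropWhile (· ≠ 'T') = [] := by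
        apply List.dropWhile_eq_nil_iff.mpr
        intro x hx
        rw [← hrest] at hx
        exact halltT x hx
      simp only [pyPartition, hdT]
      simp [P1, hd]
  | cons d tl =>
      have hdA : (d == 'A') = false := dropWhile_head_false (q := (· == 'A')) _ hd
      have hdA' : ¬ d = 'A' := by simpa using hdA
      have hrest : rest = rest.takeWhile (· == 'A') ++ (d :: tl) := by
        rw [hd] at hsplit; exact hsplit.symm
      by_cases hT : d = 'T'
      · subst hT
        have hdrop : rest.dropWhile (· ≠ 'T') = 'T' :: tl := by
          conv_lhs => rw [hrest]
          rw [dropWhile_append_all halltT]; simp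
        have htake : rest.takeWhile (· ≠ 'T') = rest.takeWhile (· == 'A') := by
          conv_lhs => rw [hrest]
          rw [takeWhile_append_all halltT]; simp
        have hmidA : (rest.takeWhile (· == 'A')).all (· == 'A') = true :=
          List.all_eq_true.mpr hallt
        simp only [pyPartition, hdrop, htake]
        rw [P1]
        simp only [hd]
        by_cases hmt : rest.takeWhile (· == 'A') = []
        · simp [hmt, P2]
        · have hne : (rest.takeWhile (· == 'A')).isEmpty = false := by
            simp [hmt]
          have hlen0 : (rest.takeWhile (· == 'A')).length ≠ 0 := by
            simpa [List.length_eq_zero_iff] using hmt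
          by_cases htl : tl.all (· == 'A') = true
          · simp [hne, P2, List.all_append, hh, hmidA, htl, hlen0]
          · have htl' : tl.all (· == 'A') = false := by
              simpa using htl
            simp [hne, P2, List.all_append, htl']
      · -- d is neither 'A' nor 'T'
        have hstep : rest.dropWhile (· ≠ 'T') = tl.dropWhile (· ≠ 'T') := by
          conv_lhs => rw [hrest]
          rw [dropWhile_append_all halltT]
          simp [hT]
        cases hd2 : tl.dropWhile (· ≠ 'T') with
        | nil =>
            rw [hd2] at hstep
            simp only [pyPartition, hstep]
            rw [P1]
            simp [hd, hT]
        | cons e tl2 =>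
            rw [hd2] at hstep
            have htake : rest.takeWhile (· ≠ 'T') = rest.takeWhile (· == 'A') ++ d :: tl.takeWhile (· ≠ 'T') := by
              conv_lhs => rw [hrest]
              rw [takeWhile_append_all halltT]
              simp [hT]
            have hbadmid : ((rest.takeWhile (· ≠ 'T')).all (· == 'A')) = false := by
              apply List.all_eq_false.mpr
              refine ⟨d, ?_, by simpa using hdA⟩
              rw [htake]; simp
            have hfull : ((head ++ rest.takeWhile (· ≠ 'T') ++ tl2).all (· == 'A')) = false := by
              simp only [List.all_append, hbadmid]
              simp
            simp only [pyPartition, hstep]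
            rw [P1]
            simp only [hd, if_neg hT]
            exact bNo head _ tl2 true hfull

theorem judge_eq (cs : List Char) : bJudge cs = P0 cs 0 := by
  have hsplit := List.takeWhile_append_dropWhile (p := (· == 'A')) (l := cs)
  have hallt : ∀ x ∈ cs.takeWhile (· == 'A'), (x == 'A') = true := by
    intro x hx; exact List.mem_takeWhile_imp (p := (· == 'A')) hx
  have halltP : ∀ x ∈ cs.takeWhile (· == 'A'), (decide (x ≠ 'P')) = true := by
    intro x hx; have := hallt x hx; simp at this; simp [this]
  cases hd : cs.dropWhile (· == 'A') with
  | nil =>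
      have hcs : cs.takeWhile (· == 'A') = cs := by
        rw [hd] at hsplit; simpa using hsplit
      have hdP : cs.dropWhile (· ≠ 'P') = [] := by
        apply List.dropWhile_eq_nil_iff.mpr
        intro x hx
        rw [← hcs] at hx
        exact halltP x hx
      rw [bJudge]
      simp only [pyPartition, hdP]
      simp [P0, hd]
  | cons c rest =>
      have hcA : (c == 'A') = false := dropWhile_head_false (q := (· == 'A')) _ hd
      have hcA' : ¬ c = 'A' := by simpa using hcA
      have hcs : cs = cs.takeWhile (· == 'A') ++ (c :: rest) := by
        rw [hd] at hsplit; exact hsplit.symm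
      by_cases hcP : c = 'P'
      · subst hcP
        have hdrop : cs.dropWhile (· ≠ 'P') = 'P' :: rest := by
          conv_lhs => rw [hcs]
          rw [dropWhile_append_all halltP]; simp
        have htake : cs.takeWhile (· ≠ 'P') = cs.takeWhile (· == 'A') := by
          conv_lhs => rw [hcs]
          rw [takeWhile_append_all halltP]; simp
        have hh : (cs.takeWhile (· == 'A')).all (· == 'A') = true :=
          List.all_eq_true.mpr hallt
        have hinner := inner_eq rest (cs.takeWhile (· == 'A')) hh
        rw [bJudge]
        simp only [pyPartition, hdrop, htake]
        rw [P0]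
        simp only [hd, Nat.zero_add]
        exact hinner
      · cases hd2 : cs.dropWhile (· ≠ 'P') with
        | nil =>
            rw [bJudge]
            simp only [pyPartition, hd2]
            rw [P0]
            simp [hd, hcP]
        | cons e r2 =>
            have htake : cs.takeWhile (· ≠ 'P') = cs.takeWhile (· == 'A') ++ c :: rest.takeWhile (· ≠ 'P') := by
              conv_lhs => rw [hcs]
              rw [takeWhile_append_all halltP]
              simp [hcP]
            have hbadhead : ((cs.takeWhile (· ≠ 'P')).all (· == 'A')) = false := by
              apply List.all_eq_false.mpr
              refine ⟨c, ?_, by simpa using hcA⟩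
              rw [htake]; simp
            have hfull : ((cs.takeWhile (· ≠ 'P') ++ (pyPartition r2 'T').1 ++ (pyPartition r2 'T').2.2).all (· == 'A')) = false := by
              simp only [List.all_append, hbadhead]
              simp
            rw [bJudge]
            simp only [pyPartition, hd2]
            rw [P0]
            simp only [hd, if_neg hcP]
            exact bNo _ _ _ _ hfull

-- ===== VERDICT (by name: the statement is the Claim_ definition above) =====
theorem check_pat_spec : Claim_equal_check_pat := by
  intro pat_list _
  unfold Spec_check_pat check_pat check_pat_alt
  refine List.map_congr_left ?_
  intro p _
  rw [aLoop0_eq, judge_eq]
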